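-- pv_equiv track=rewrite | github.com/jiajunma/kosulcodes | RSK.py | rsk
-- ===== SOURCE A (Python) =====
-- def row_insert(tableau, x):
--     """
--     Insert x into tableau using row insertion.
--
--     Args:
--         tableau: list of rows (each row is a list of ints, increasing).
--         x: integer to insert.
--
--     Returns:
--         The row index where the new box was appended.
--     """
--     for row_idx, row in enumerate(tableau):
--         for col_idx, y in enumerate(row):
--             if x < y:
--                 row[col_idx], x = x, y
--                 break
--         else:
--             row.append(x)
--             return row_idx
--     tableau.append([x])
--     return len(tableau) - 1
--
-- def rsk(w):
--     """
--     Compute the RSK insertion and recording tableaux for a permutation/word w.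
--
--     Args:
--         w: iterable of integers (typically a permutation of 1..n)
--
--     Returns:
--         (P, Q) where P and Q are tableaux represented as list of rows.
--
--     Examples:
--         >>> rsk([3, 1, 4, 2])
--         ([[1, 2], [3, 4]], [[1, 3], [2, 4]])
--         >>> rsk([2, 1, 3])
--         ([[1, 3], [2]], [[1, 3], [2]])
--     """
--     P = []
--     Q = []
--     for idx, x in enumerate(w, start=1):
--         row_idx = row_insert(P, x)
--         while len(Q) <= row_idx:
--             Q.append([])
--         Q[row_idx].append(idx)
--     return P, Q
-- ===== SOURCE B (Python) =====
-- def _split(row, x):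
--     # (prefix of entries <= x, remainder starting at the first entry > x)
--     j = 0
--     while j < len(row) and row[j] <= x:
--         j += 1
--     return row[:j], row[j:]
--
--
-- def rsk(w):
--     # Level-by-level RSK: build P and Q one row at a time.  Each pass inserts
--     # the current stream of (index, value) pairs into a single fresh row;
--     # bumped values (keeping their original index) form the stream for the
--     # next, deeper row.  No per-letter bumping chain down the tableau.
--     P, Q = [], []
--     pairs = [(i, x) for i, x in enumerate(w, start=1)]
--     while pairs:
--         row, qrow, nxt = [], [], []
--         for i, x in pairs:
--             lo, hi = _split(row, x)
--             if not hi: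
--                 row = lo + [x]
--                 qrow.append(i)
--             else:
--                 nxt.append((i, hi[0]))
--                 row = lo + [x] + hi[1:]
--         P.append(row)
--         Q.append(qrow)
--         pairs = nxt
--     return P, Q
-- ===== Notes on version B (the rewrite author's own statement) =====
-- stated objective: alternative
-- what changed: B builds the tableaux level by level: one pass per row inserts the whole stream of (index,value) pairs into a single fresh row and forwards the bumped pairs to the next row, replacing A's per-letter bumping chain down the tableau and its Q-padding bookkeeping.
import Mathlib
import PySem

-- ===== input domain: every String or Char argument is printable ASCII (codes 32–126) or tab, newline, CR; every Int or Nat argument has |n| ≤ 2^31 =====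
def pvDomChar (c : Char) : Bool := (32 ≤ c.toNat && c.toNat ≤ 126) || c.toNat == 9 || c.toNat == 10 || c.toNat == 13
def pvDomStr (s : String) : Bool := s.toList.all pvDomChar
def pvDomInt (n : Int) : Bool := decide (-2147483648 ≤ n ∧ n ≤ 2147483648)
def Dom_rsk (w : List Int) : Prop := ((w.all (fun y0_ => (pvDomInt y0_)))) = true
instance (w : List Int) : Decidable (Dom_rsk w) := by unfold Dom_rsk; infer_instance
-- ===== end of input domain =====

-- B replaces A's per-letter bumping chains by a level-by-level construction (one whole
-- row of P and Q per pass over the surviving stream); objective: alternative algorithm.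

-- ===== PORT A =====
-- enumerate(w, start=i) as (index, value) pairs (used by both ports' enumerations)
def pvEnumFrom (i : Int) : List Int → List (Int × Int)
  | [] => []
  | x :: xs => (i, x) :: pvEnumFrom (i + 1) xs

-- inner loop of row_insert: first y with x < y is swapped with x ('break'); none = 'else: append'
def bumpA : List Int → Int → Option (List Int × Int)
  | [], _ => none
  | y :: ys, x =>
    if x < y then some (x :: ys, y)
    else
      match bumpA ys x with
      | none => none
      | some rz => some (y :: rz.1, rz.2)

-- row_insert: functional rendering of the in-place row loop (returns new tableau and row index)
def rowInsertA : List (List Int) → Int → List (List Int) × Nat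
  | [], x => ([[x]], 0)
  | r :: rs, x =>
    match bumpA r x with
    | none => ((r ++ [x]) :: rs, 0)
    | some rz => (rz.1 :: (rowInsertA rs rz.2).1, (rowInsertA rs rz.2).2 + 1)

-- 'while len(Q) <= row_idx: Q.append([])'
def padA (Q : List (List Int)) (d : Nat) : List (List Int) :=
  if Q.length ≤ d then padA (Q ++ [[]]) d else Q
termination_by d + 1 - Q.length

-- 'Q[row_idx].append(idx)' after the padding loop
def qAppendA (Q : List (List Int)) (d : Nat) (i : Int) : List (List Int) :=
  (padA Q d).modify d (fun q => q ++ [i])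

-- body of A's main loop
def stepA (s : List (List Int) × List (List Int)) (p : Int × Int) :
    List (List Int) × List (List Int) :=
  ((rowInsertA s.1 p.2).1, qAppendA s.2 (rowInsertA s.1 p.2).2 p.1)

def rsk (w : List Int) : List (List Int) × List (List Int) :=
  List.foldl stepA ([], []) (pvEnumFrom 1 w)

-- ===== PORT B =====
-- _split's scanning loop: j = number of leading entries ≤ x (stops at the first entry > x)
def splitLenB : List Int → Int → Nat
  | [], _ => 0
  | y :: ys, x => if y > x then 0 else splitLenB ys x + 1

-- _split(row, x) = (row[:j], row[j:])
def splitB (row : List Int) (x : Int) : List Int × List Int :=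
  (row.take (splitLenB row x), row.drop (splitLenB row x))

theorem splitB_nil (x : Int) : splitB [] x = ([], []) := rfl

-- one pass of B's inner for-loop; state = (row, qrow, nxt)
def rowPassB (s : List Int × List Int × List (Int × Int)) :
    List (Int × Int) → List Int × List Int × List (Int × Int)
  | [] => s
  | p :: ps =>
    match splitB s.1 p.2 with
    | (lo, []) => rowPassB (lo ++ [p.2], s.2.1 ++ [p.1], s.2.2) ps
    | (lo, y :: hi') => rowPassB (lo ++ p.2 :: hi', s.2.1, s.2.2 ++ [(p.1, y)]) ps

-- termination of the while loop: each pass strictly shortens the stream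
theorem rowPassB_len : ∀ (ps : List (Int × Int)) (s : List Int × List Int × List (Int × Int)),
    ((rowPassB s ps).2.2).length ≤ s.2.2.length + ps.length := by
  intro ps
  induction ps with
  | nil => intro s; simp [rowPassB]
  | cons p ps ih =>
    intro s
    simp only [rowPassB]
    cases h : splitB s.1 p.2 with
    | mk lo hi =>
      cases hi with
      | nil =>
        have := ih (lo ++ [p.2], s.2.1 ++ [p.1], s.2.2)
        simp at this ⊢; omega
      | cons y hi' =>
        have := ih (lo ++ p.2 :: hi', s.2.1, s.2.2 ++ [(p.1, y)])
        simp at this ⊢; omega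

-- B's 'while pairs:' loop
def levelsB : List (Int × Int) → List (List Int) × List (List Int)
  | [] => ([], [])
  | p :: ps =>
    ((rowPassB ([], [], []) (p :: ps)).1 :: (levelsB ((rowPassB ([], [], []) (p :: ps)).2.2)).1,
     (rowPassB ([], [], []) (p :: ps)).2.1 :: (levelsB ((rowPassB ([], [], []) (p :: ps)).2.2)).2)
termination_by ps => ps.length
decreasing_by
  simp only [rowPassB, splitB_nil]
  have := rowPassB_len ps ([] ++ [p.2], [] ++ [p.1], [])
  simp at this ⊢
  omega

def rsk_alt (w : List Int) : List (List Int) × List (List Int) :=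
  levelsB (pvEnumFrom 1 w)

-- ===== PRECONDITION & SPEC =====
def Spec_rsk (w : List Int) (out : List (List Int) × List (List Int)) : Prop := out = rsk_alt w
instance (w : List Int) (out : List (List Int) × List (List Int)) : Decidable (Spec_rsk w out) := by unfold Spec_rsk; infer_instance

-- ===== CLAIM (what is proved, stated in full; the proofs are below) =====
def Claim_equal_rsk : Prop := ∀ (w : List Int), Dom_rsk w → Spec_rsk w (rsk w)

-- ===== LEMMAS AND PROOFS =====

theorem splitB_cons (y : Int) (ys : List Int) (x : Int) :
    splitB (y :: ys) x =
      if y ≤ x then ((y :: (splitB ys x).1), (splitB ys x).2) else ([], y :: ys) := by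
  by_cases h : y ≤ x
  · have h2 : ¬ y > x := by omega
    simp [splitB, splitLenB, h, h2]
  · have h2 : y > x := by omega
    simp [splitB, splitLenB, h, h2]

theorem splitB_append : ∀ (r : List Int) (x : Int), (splitB r x).1 ++ (splitB r x).2 = r := by
  intro r x
  simp [splitB]

theorem bumpA_split : ∀ (r : List Int) (x : Int),
    bumpA r x = match (splitB r x).2 with
      | [] => none
      | y :: hi' => some ((splitB r x).1 ++ x :: hi', y) := by
  intro r x
  induction r with
  | nil => simp [bumpA, splitB_nil]
  | cons y ys ih =>
    simp only [bumpA, splitB_cons]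
    by_cases h : y ≤ x
    · have hx : ¬ x < y := by omega
      simp only [if_neg hx, if_pos h, ih]
      cases hs : (splitB ys x).2 with
      | nil => simp
      | cons z hi' => simp
    · have hx : x < y := by omega
      simp [if_pos hx, if_neg h]

theorem padA_nil_zero : padA [] 0 = [[]] := by
  rw [padA]; simp; rw [padA]; simp

theorem qAppendA_nil_zero (i : Int) : qAppendA [] 0 i = [[i]] := by
  simp [qAppendA, padA_nil_zero, List.modify]

theorem padA_not_le (Q : List (List Int)) (d : Nat) (h : ¬ Q.length ≤ d) : padA Q d = Q := by
  rw [padA]; simp [h]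

theorem padA_cons (d : Nat) (q : List Int) : ∀ (qs : List (List Int)),
    padA (q :: qs) (d + 1) = q :: padA qs d := by
  intro qs
  induction qs using padA.induct (d := d) with
  | case1 qs h ih =>
    conv_lhs => rw [padA]
    simp only [List.length_cons]
    rw [if_pos (by omega)]
    have hc : (q :: qs) ++ [[]] = q :: (qs ++ [[]]) := by simp
    rw [hc, ih]
    conv_rhs => rw [padA]
    rw [if_pos h]
  | case2 qs h =>
    conv_lhs => rw [padA]
    simp only [List.length_cons]
    rw [if_neg (by omega)]
    conv_rhs => rw [padA]
    rw [if_neg h]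

theorem padA_zero_cons (q : List Int) (qs : List (List Int)) : padA (q :: qs) 0 = q :: qs := by
  apply padA_not_le; simp

theorem qAppendA_zero_cons (q : List Int) (qs : List (List Int)) (i : Int) :
    qAppendA (q :: qs) 0 i = (q ++ [i]) :: qs := by
  simp [qAppendA, padA_zero_cons, List.modify]

theorem qAppendA_succ (q : List Int) (qs : List (List Int)) (d : Nat) (i : Int) :
    qAppendA (q :: qs) (d + 1) i = q :: qAppendA qs d i := by
  simp [qAppendA, padA_cons]

theorem rowPassB_app_step (row q : List Int) (nxt : List (Int × Int)) (p : Int × Int)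
    (ps : List (Int × Int)) (lo : List Int) (h : splitB row p.2 = (lo, [])) :
    rowPassB (row, q, nxt) (p :: ps) = rowPassB (lo ++ [p.2], q ++ [p.1], nxt) ps := by
  simp [rowPassB, h]

theorem rowPassB_bump_step (row q : List Int) (nxt : List (Int × Int)) (p : Int × Int)
    (ps : List (Int × Int)) (lo : List Int) (y : Int) (hi' : List Int)
    (h : splitB row p.2 = (lo, y :: hi')) :
    rowPassB (row, q, nxt) (p :: ps) = rowPassB (lo ++ p.2 :: hi', q, nxt ++ [(p.1, y)]) ps := by
  simp [rowPassB, h]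

theorem stepA_cons_app (r : List Int) (rs : List (List Int)) (q : List Int)
    (qs : List (List Int)) (p : Int × Int) (lo : List Int) (h : splitB r p.2 = (lo, [])) :
    stepA (r :: rs, q :: qs) p = ((r ++ [p.2]) :: rs, (q ++ [p.1]) :: qs) := by
  have hb : bumpA r p.2 = none := by simp [bumpA_split, h]
  simp [stepA, rowInsertA, hb, qAppendA_zero_cons]

theorem stepA_cons_bump (r : List Int) (rs : List (List Int)) (q : List Int)
    (qs : List (List Int)) (p : Int × Int) (lo : List Int) (y : Int) (hi' : List Int)
    (h : splitB r p.2 = (lo, y :: hi')) :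
    stepA (r :: rs, q :: qs) p =
      ((lo ++ p.2 :: hi') :: (stepA (rs, qs) (p.1, y)).1, q :: (stepA (rs, qs) (p.1, y)).2) := by
  have hb : bumpA r p.2 = some (lo ++ p.2 :: hi', y) := by simp [bumpA_split, h]
  simp [stepA, rowInsertA, hb, qAppendA_succ]

-- accumulator lemma for B's inner pass
theorem rowPassB_acc : ∀ (ps : List (Int × Int)) (row q : List Int) (nxt : List (Int × Int)),
    rowPassB (row, q, nxt) ps =
      ((rowPassB (row, [], []) ps).1,
       q ++ (rowPassB (row, [], []) ps).2.1,
       nxt ++ (rowPassB (row, [], []) ps).2.2) := by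
  intro ps
  induction ps with
  | nil => intro row q nxt; simp [rowPassB]
  | cons p ps ih =>
    intro row q nxt
    cases h : splitB row p.2 with
    | mk lo hi =>
      cases hi with
      | nil =>
        rw [rowPassB_app_step _ _ _ _ _ _ h, rowPassB_app_step _ _ _ _ _ _ h,
            ih (lo ++ [p.2]) (q ++ [p.1]) nxt, ih (lo ++ [p.2]) ([] ++ [p.1]) []]
        simp
      | cons y hi' =>
        rw [rowPassB_bump_step _ _ _ _ _ _ _ _ h, rowPassB_bump_step _ _ _ _ _ _ _ _ h,
            ih (lo ++ p.2 :: hi') q (nxt ++ [(p.1, y)]), ih (lo ++ p.2 :: hi') [] ([] ++ [(p.1, y)])]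
        simp

-- main decomposition: folding A's steps over a state with explicit first row equals
-- one B-pass over the first row followed by folding A's steps over the bumped stream
theorem decompose : ∀ (ps : List (Int × Int)) (r : List Int) (rs : List (List Int))
    (q : List Int) (qs : List (List Int)),
    List.foldl stepA (r :: rs, q :: qs) ps =
      ((rowPassB (r, q, []) ps).1 ::
         (List.foldl stepA (rs, qs) ((rowPassB (r, q, []) ps).2.2)).1,
       (rowPassB (r, q, []) ps).2.1 ::
         (List.foldl stepA (rs, qs) ((rowPassB (r, q, []) ps).2.2)).2) := by
  intro ps
  induction ps with
  | nil => intro r rs q qs; simp [rowPassB]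
  | cons p ps ih =>
    intro r rs q qs
    cases h : splitB r p.2 with
    | mk lo hi =>
      cases hi with
      | nil =>
        have hlo : lo = r := by
          have h2 := splitB_append r p.2
          rw [h] at h2; simpa using h2
        subst hlo
        rw [List.foldl_cons, stepA_cons_app _ _ _ _ _ _ h,
            rowPassB_app_step _ _ _ _ _ _ h, ih]
      | cons y hi' =>
        rw [List.foldl_cons, stepA_cons_bump _ _ _ _ _ _ _ _ h,
            rowPassB_bump_step _ _ _ _ _ _ _ _ h, ih,
            rowPassB_acc ps (lo ++ p.2 :: hi') q ([] ++ [(p.1, y)]),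
            rowPassB_acc ps (lo ++ p.2 :: hi') q []]
        simp [List.foldl_cons]

theorem levelsB_nil : levelsB [] = ([], []) := by
  simp [levelsB.eq_def]

theorem levelsB_cons (p : Int × Int) (ps : List (Int × Int)) :
    levelsB (p :: ps) =
      ((rowPassB ([], [], []) (p :: ps)).1 :: (levelsB ((rowPassB ([], [], []) (p :: ps)).2.2)).1,
       (rowPassB ([], [], []) (p :: ps)).2.1 :: (levelsB ((rowPassB ([], [], []) (p :: ps)).2.2)).2) := by
  rw [levelsB]

theorem main_equiv : ∀ (n : Nat) (ps : List (Int × Int)), ps.length ≤ n →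
    List.foldl stepA ([], []) ps = levelsB ps := by
  intro n
  induction n with
  | zero =>
    intro ps h
    have : ps = [] := by cases ps <;> simp_all
    subst this; simp [levelsB_nil]
  | succ n ih =>
    intro ps h
    cases ps with
    | nil => simp [levelsB_nil]
    | cons p ps =>
      have hstep : stepA ([], []) p = ([[p.2]], [[p.1]]) := by
        simp [stepA, rowInsertA, qAppendA_nil_zero]
      have hpass : rowPassB ([], [], []) (p :: ps) = rowPassB ([p.2], [p.1], []) ps := by
        have h0 : splitB ([] : List Int) p.2 = ([], []) := splitB_nil p.2
        rw [rowPassB_app_step _ _ _ _ _ _ h0]; simp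
      have hlen : ((rowPassB ([p.2], [p.1], []) ps).2.2).length ≤ n := by
        have := rowPassB_len ps ([p.2], [p.1], [])
        simp at this h; omega
      rw [List.foldl_cons, hstep, decompose, ih _ hlen, levelsB_cons, hpass]

-- ===== VERDICT (by name: the statement is the Claim_ definition above) =====
theorem rsk_spec : Claim_equal_rsk := by
  intro w _
  unfold Spec_rsk rsk rsk_alt
  exact main_equiv (pvEnumFrom 1 w).length _ le_rfl
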